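-- pv_equiv track=rewrite | github.com/sergey3bv/divine-blossom | scripts/probe_video_readiness.py | _first_hls_ready_index
-- ===== SOURCE A (Python) =====
-- READY_STATUSES = {200, 206}
--
-- def is_ready_status(status: int | None) -> bool:
--     return status in READY_STATUSES
--
-- def _first_ready_index(observations: list[dict[str, int]], key: str) -> int | None:
--     for index, observation in enumerate(observations):
--         if is_ready_status(observation.get(key)):
--             return index
--     return None
--
-- def _first_hls_ready_index(observations: list[dict[str, int]]) -> int | None:
--     indices = [
--         index
--         for index in (
--             _first_ready_index(observations, "hls_master"),
--             _first_ready_index(observations, "hls_variant_manifest"),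
--         )
--         if index is not None
--     ]
--     if not indices:
--         return None
--     return min(indices)
-- ===== SOURCE B (Python) =====
-- READY_STATUSES = {200, 206}
--
-- def _first_hls_ready_index(observations):
--     for index, observation in enumerate(observations):
--         if (observation.get("hls_master") in READY_STATUSES
--                 or observation.get("hls_variant_manifest") in READY_STATUSES):
--             return index
--     return None
-- ===== Notes on version B (the rewrite author's own statement) =====
-- stated objective: simpler
-- what changed: Replaces the two separate per-key scans plus a filter-and-min combination with a single early-exit enumerate loop that checks both keys in the same iteration.
import Mathlib
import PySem

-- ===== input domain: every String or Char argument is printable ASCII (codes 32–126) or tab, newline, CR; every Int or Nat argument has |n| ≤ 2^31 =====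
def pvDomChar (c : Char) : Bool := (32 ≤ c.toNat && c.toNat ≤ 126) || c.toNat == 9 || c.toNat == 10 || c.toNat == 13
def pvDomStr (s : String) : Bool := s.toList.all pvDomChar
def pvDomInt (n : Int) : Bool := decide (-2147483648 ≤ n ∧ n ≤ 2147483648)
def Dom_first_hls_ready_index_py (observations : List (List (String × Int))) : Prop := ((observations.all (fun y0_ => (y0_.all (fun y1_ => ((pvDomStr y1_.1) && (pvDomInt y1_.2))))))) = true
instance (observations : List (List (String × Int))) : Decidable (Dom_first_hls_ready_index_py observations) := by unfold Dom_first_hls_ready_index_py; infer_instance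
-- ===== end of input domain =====

-- B fuses A's two per-key scans + filter-and-min into one early-exit loop over enumerate (simpler; same result).


-- ===== PORT A =====
-- is_ready_status: status in {200, 206}
def isReadyStatusA (status : Option Int) : Bool := status == some 200 || status == some 206

-- _first_ready_index: loop over enumerate(observations), return index on first ready status for `key`
def firstReadyIdxA (observations : List (List (String × Int))) (key : String) (i : Int) : Option Int :=
  match observations with
  | [] => none
  | o :: rest =>
      if isReadyStatusA ((PySem.Dict.mk o).get? key) then some i
      else firstReadyIdxA rest key (i + 1)

def first_hls_ready_index_py (observations : List (List (String × Int))) : Option Int :=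
  let indices := ([firstReadyIdxA observations "hls_master" 0,
                   firstReadyIdxA observations "hls_variant_manifest" 0]).filterMap id
  if indices = [] then none
  else PySem.List.min? indices (fun x => x)

-- ===== PORT B =====
-- single enumerate loop, both keys checked in the same iteration, early return
def altLoop (observations : List (List (String × Int))) (i : Int) : Option Int :=
  match observations with
  | [] => none
  | o :: rest =>
      if ((PySem.Dict.mk o).get? "hls_master" == some 200 || (PySem.Dict.mk o).get? "hls_master" == some 206)
         || ((PySem.Dict.mk o).get? "hls_variant_manifest" == some 200 || (PySem.Dict.mk o).get? "hls_variant_manifest" == some 206)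
      then some i
      else altLoop rest (i + 1)

def first_hls_ready_index_py_alt (observations : List (List (String × Int))) : Option Int :=
  altLoop observations 0

-- ===== PRECONDITION & SPEC =====
def Spec_first_hls_ready_index_py (observations : List (List (String × Int))) (out : Option Int) : Prop := out = first_hls_ready_index_py_alt observations
instance (observations : List (List (String × Int))) (out : Option Int) : Decidable (Spec_first_hls_ready_index_py observations out) := by unfold Spec_first_hls_ready_index_py; infer_instance

-- ===== CLAIM (what is proved, stated in full; the proofs are below) =====
def Claim_equal_first_hls_ready_index_py : Prop := ∀ (observations : List (List (String × Int))), Dom_first_hls_ready_index_py observations → Spec_first_hls_ready_index_py observations (first_hls_ready_index_py observations)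

-- ===== LEMMAS AND PROOFS =====

-- combination A performs on the two partial results
def combMin (a b : Option Int) : Option Int :=
  match a, b with
  | none, none => none
  | some x, none => some x
  | none, some y => some y
  | some x, some y => some (min x y)

lemma firstReadyIdxA_le (obs : List (List (String × Int))) (key : String) (i j : Int)
    (h : firstReadyIdxA obs key i = some j) : i ≤ j := by
  induction obs generalizing i with
  | nil => simp [firstReadyIdxA] at h
  | cons o rest ih =>
      simp only [firstReadyIdxA] at h
      split at h
      · cases h; exact le_refl _
      · have := ih (i + 1) h; omega

lemma altLoop_cons (o : List (String × Int)) (rest : List (List (String × Int))) (i : Int) :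
    altLoop (o :: rest) i
      = if isReadyStatusA ((PySem.Dict.mk o).get? "hls_master")
          || isReadyStatusA ((PySem.Dict.mk o).get? "hls_variant_manifest")
        then some i else altLoop rest (i + 1) := rfl

lemma comb_eq_alt (obs : List (List (String × Int))) (i : Int) :
    combMin (firstReadyIdxA obs "hls_master" i) (firstReadyIdxA obs "hls_variant_manifest" i)
      = altLoop obs i := by
  induction obs generalizing i with
  | nil => simp [firstReadyIdxA, altLoop, combMin]
  | cons o rest ih =>
      rw [altLoop_cons]
      simp only [firstReadyIdxA]
      cases h1 : isReadyStatusA ((PySem.Dict.mk o).get? "hls_master") <;>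
      cases h2 : isReadyStatusA ((PySem.Dict.mk o).get? "hls_variant_manifest") <;>
        simp only [h1, h2, if_true, if_false, Bool.false_or, Bool.true_or, Bool.or_self,
          Bool.or_true, cond_true, cond_false, ite_true, ite_false]
      · exact ih (i + 1)
      · rcases hr : firstReadyIdxA rest "hls_master" (i + 1) with _ | j
        · simp [combMin]
        · have := firstReadyIdxA_le rest _ _ _ hr
          simp [combMin, min_eq_right (show i ≤ j by omega)]
      · rcases hr : firstReadyIdxA rest "hls_variant_manifest" (i + 1) with _ | j
        · simp [combMin]
        · have := firstReadyIdxA_le rest _ _ _ hr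
          simp [combMin, min_eq_left (show i ≤ j by omega)]
      · simp [combMin]

lemma a_eq_comb (obs : List (List (String × Int))) :
    first_hls_ready_index_py obs
      = combMin (firstReadyIdxA obs "hls_master" 0) (firstReadyIdxA obs "hls_variant_manifest" 0) := by
  unfold first_hls_ready_index_py
  rcases h1 : firstReadyIdxA obs "hls_master" 0 with _ | x <;>
  rcases h2 : firstReadyIdxA obs "hls_variant_manifest" 0 with _ | y <;>
    simp [combMin, PySem.List.min?, List.filterMap]
  split_ifs with h <;> simp [min_def] <;> omega

-- ===== VERDICT (by name: the statement is the Claim_ definition above) =====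
theorem first_hls_ready_index_py_spec : Claim_equal_first_hls_ready_index_py := by
  intro obs _
  unfold Spec_first_hls_ready_index_py first_hls_ready_index_py_alt
  rw [a_eq_comb, comb_eq_alt]
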